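-- pv_equiv track=rewrite | github.com/TartagliaSebby/FInal-Year-Project-Degree- | ExpressWay_WMS/genetic_algo_script.py | splitOrders
-- ===== SOURCE A (Python) =====
-- def splitOrders(orderList,numOfEmp):
--     splitedOrders = []
--     numOfOrd = len(orderList)
--     ordPerEmp = int(numOfOrd/numOfEmp)
--     extraOrds = numOfOrd%numOfEmp
--     #assign orders to employees evenly
--     for i in range (0, numOfEmp):
--         splitedOrders.append(orderList[ordPerEmp*i:ordPerEmp*(i+1)])
--     #assign left over orders to some employees
--     indLeftOrd = ordPerEmp * numOfEmp
--     for i in range (0,extraOrds):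
--         splitedOrders[i].append(orderList[indLeftOrd+i])
--     return splitedOrders
-- ===== SOURCE B (Python) =====
-- def splitOrders(orderList, numOfEmp):
--     # element-centric: one pass over the orders, computing each order's owner
--     base = len(orderList) // numOfEmp
--     cut = base * numOfEmp
--     buckets = [[] for _ in range(numOfEmp)]
--     for p, order in enumerate(orderList):
--         owner = p // base if p < cut else p - cut
--         buckets[owner].append(order)
--     return buckets
-- ===== Notes on version B (the rewrite author's own statement) =====
-- stated objective: alternative
-- what changed: Replaces A's employee-centric construction (one loop appending a slice per employee, then a second loop mutating the first buckets with leftovers) by a single element-centric pass that computes each order's owner bucket by index arithmetic and appends it there.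
-- outside the precondition, e.g. on splitOrders([1, 2, 3], -1): A returns [], B raises IndexError; on splitOrders([], -2): A returns [], B returns []
import Mathlib
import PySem

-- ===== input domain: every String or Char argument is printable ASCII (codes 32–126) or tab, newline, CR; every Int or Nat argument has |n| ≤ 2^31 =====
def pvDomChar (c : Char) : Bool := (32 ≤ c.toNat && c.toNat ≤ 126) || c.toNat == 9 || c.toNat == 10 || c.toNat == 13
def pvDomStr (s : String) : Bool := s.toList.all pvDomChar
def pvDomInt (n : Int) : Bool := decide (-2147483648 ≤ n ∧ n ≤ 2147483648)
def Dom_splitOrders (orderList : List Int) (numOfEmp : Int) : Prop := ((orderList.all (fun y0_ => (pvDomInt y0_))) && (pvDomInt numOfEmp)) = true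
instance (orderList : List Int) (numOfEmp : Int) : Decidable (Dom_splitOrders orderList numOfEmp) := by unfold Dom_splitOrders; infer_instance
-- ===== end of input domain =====

-- B replaces A's employee-centric slicing (slice per employee, then leftover mutation loop)
-- by a single element-centric pass that computes each order's owner bucket; same return value.


-- ===== PORT A =====
-- literal transliteration of A: int(n/m) → truncdiv, n%m → PySem.Int.mod, the two range
-- loops → foldl over pyRange; 'splitedOrders[i].append(x)' → List.modify at i (i ≥ 0 here);
-- orderList[indLeftOrd+i] → pyGetD (always in range when numOfEmp ≥ 1, cf. Pre_).
def splitOrders (orderList : List Int) (numOfEmp : Int) : List (List Int) :=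
  let numOfOrd : Int := orderList.length
  let ordPerEmp := PySem.Int.truncdiv numOfOrd numOfEmp
  let extraOrds := PySem.Int.mod numOfOrd numOfEmp
  let splitedOrders := (PySem.List.pyRange 0 numOfEmp 1).foldl
    (fun acc i => acc ++ [PySem.List.slice orderList (some (ordPerEmp * i)) (some (ordPerEmp * (i + 1)))]) []
  let indLeftOrd := ordPerEmp * numOfEmp
  (PySem.List.pyRange 0 extraOrds 1).foldl
    (fun acc i => acc.modify i.toNat (fun l => l ++ [PySem.List.pyGetD orderList (indLeftOrd + i) 0])) splitedOrders

-- ===== PORT B =====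
-- literal transliteration of Source B: one pass over enumerate(orderList); each order is appended
-- to the bucket of its owner (owner ≥ 0 whenever numOfEmp ≥ 1, so .toNat is exact there).
def splitOrders_alt (orderList : List Int) (numOfEmp : Int) : List (List Int) :=
  let base := PySem.Int.floordiv (orderList.length : Int) numOfEmp
  let cut := base * numOfEmp
  let buckets : List (List Int) := List.replicate numOfEmp.toNat []
  (PySem.List.enumerate orderList 0).foldl
    (fun bks po =>
      let owner := if po.1 < cut then PySem.Int.floordiv po.1 base else po.1 - cut
      bks.modify owner.toNat (fun l => l ++ [po.2])) buckets

-- ===== PRECONDITION & SPEC =====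
-- Pre_ excludes numOfEmp ≤ 0, outside the task's natural domain: numOfEmp = 0 raises
-- ZeroDivisionError in A, and for negative employee counts A's empty result is an accident
-- of Python's empty ranges (B naturally raises there on a nonempty list).
def Pre_splitOrders (orderList : List Int) (numOfEmp : Int) : Prop := 1 ≤ numOfEmp
instance (orderList : List Int) (numOfEmp : Int) : Decidable (Pre_splitOrders orderList numOfEmp) := by unfold Pre_splitOrders; infer_instance
def pvWitness_splitOrders : List Int × Int := ([7, -2, 5, 5, 0], 3)
def Spec_splitOrders (orderList : List Int) (numOfEmp : Int) (out : List (List Int)) : Prop := out = splitOrders_alt orderList numOfEmp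
instance (orderList : List Int) (numOfEmp : Int) (out : List (List Int)) : Decidable (Spec_splitOrders orderList numOfEmp out) := by unfold Spec_splitOrders; infer_instance

-- ===== CLAIM (what is proved, stated in full; the proofs are below) =====
def Claim_equal_splitOrders : Prop := ∀ (orderList : List Int) (numOfEmp : Int), Dom_splitOrders orderList numOfEmp → Pre_splitOrders orderList numOfEmp → Spec_splitOrders orderList numOfEmp (splitOrders orderList numOfEmp)

-- ===== LEMMAS AND PROOFS =====

-- common target: bucket j = the j-th base block followed by the j-th leftover (if any)
def tgtBuckets (xs : List Int) (b M : Nat) : List (List Int) :=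
  (List.range M).map (fun j => (xs.drop (b * j)).take b ++ ((xs.drop (b * M))[j]?).toList)

theorem map_getD_range (s : List (List Int)) :
    (List.range s.length).map (fun j => s.getD j []) = s := by
  apply List.ext_getElem (by simp)
  intro j h1 h2
  simp [List.getD_eq_getElem?_getD, List.getElem?_eq_getElem h2]

theorem foldl_modify_range (e : Nat) (s : List (List Int)) (g : Nat → Int) (he : e ≤ s.length) :
    (List.range e).foldl (fun acc k => acc.modify k (fun l => l ++ [g k])) s
    = (List.range s.length).map (fun j => if j < e then s.getD j [] ++ [g j] else s.getD j []) := by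
  induction e with
  | zero => simpa using (map_getD_range s).symm
  | succ e ih =>
    rw [List.range_succ, List.foldl_append, ih (by omega)]
    apply List.ext_getElem (by simp)
    intro j h1 h2
    simp only [List.foldl_cons, List.foldl_nil]
    rw [List.getElem_modify]
    simp only [List.getElem_map, List.getElem_range]
    by_cases hj : e = j
    · subst hj; simp [List.getD_eq_getElem]
    · simp only [if_neg hj]
      by_cases hlt : j < e
      · simp [hlt, Nat.lt_succ_of_lt hlt]
      · have : ¬ j < e + 1 := by omega
        simp [hlt, this]

theorem flatMap_singleton_map {α β : Type} (l : List α) (f : α → List β) :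
    l.flatMap (fun x => [f x]) = l.map f := by
  induction l with
  | nil => rfl
  | cons a l ih => simp [List.flatMap_cons, ih]

theorem getD_map_range' (M j : Nat) (f : Nat → List Int) (hj : j < M) :
    ((List.range M).map f).getD j [] = f j := by
  rw [List.getD_eq_getElem?_getD, List.getElem?_map, List.getElem?_range hj]
  rfl

theorem A_eq_tgt (xs : List Int) (M : Nat) (hM : 1 ≤ M) :
    splitOrders xs (M : Int) = tgtBuckets xs (xs.length / M) M := by
  have htr : PySem.Int.truncdiv (xs.length : Int) (M : Int) = ((xs.length / M : Nat) : Int) := by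
    simp [PySem.Int.truncdiv, Int.tdiv]
  have hmod : PySem.Int.mod (xs.length : Int) (M : Int) = ((xs.length % M : Nat) : Int) :=
    PySem.Int.mod_natCast xs.length M
  show (PySem.List.pyRange 0 (PySem.Int.mod (xs.length : Int) (M : Int)) 1).foldl
      (fun acc i => acc.modify i.toNat (fun l => l ++
        [PySem.List.pyGetD xs (PySem.Int.truncdiv (xs.length : Int) (M : Int) * (M : Int) + i) 0]))
      ((PySem.List.pyRange 0 (M : Int) 1).foldl
        (fun acc i => acc ++ [PySem.List.slice xs (some (PySem.Int.truncdiv (xs.length : Int) (M : Int) * i))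
          (some (PySem.Int.truncdiv (xs.length : Int) (M : Int) * (i + 1)))]) [])
      = tgtBuckets xs (xs.length / M) M
  rw [htr, hmod]
  set b0 := xs.length / M with hb0
  set e0 := xs.length % M with he0
  clear_value b0 e0
  have hdm : M * b0 + e0 = xs.length := by rw [hb0, he0]; exact Nat.div_add_mod xs.length M
  have heM : e0 < M := by rw [he0]; exact Nat.mod_lt _ (by omega)
  have hmm : M * b0 = b0 * M := Nat.mul_comm M b0
  clear hb0 he0 htr hmod
  -- step 1: the first loop builds the M base slices
  have hs0 : (PySem.List.pyRange 0 (M : Int) 1).foldl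
      (fun acc i => acc ++ [PySem.List.slice xs (some ((b0 : Int) * i)) (some ((b0 : Int) * (i + 1)))]) []
      = (List.range M).map (fun k => (xs.drop (b0 * k)).take b0) := by
    rw [PySem.List.foldl_append_eq_flatMap, PySem.List.pyRange_one]
    simp only [sub_zero, Int.toNat_natCast, List.flatMap_map, zero_add, List.nil_append]
    rw [flatMap_singleton_map]
    apply List.map_congr_left
    intro k _
    have h1 : ((b0 : Int) * (k : Int)) = ((b0 * k : Nat) : Int) := by push_cast; ring
    have h2 : ((b0 : Int) * ((k : Int) + 1)) = ((b0 * (k+1) : Nat) : Int) := by push_cast; ring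
    rw [h1, h2, PySem.List.slice_natCast]
    have hbb : b0 * (k+1) - b0 * k = b0 := by rw [Nat.mul_succ]; omega
    rw [hbb]
  rw [hs0, PySem.List.pyRange_one]
  rw [List.foldl_map]
  simp only [sub_zero, Int.toNat_natCast, zero_add]
  have hcast : ∀ k : Nat, ((b0 : Int) * (M : Int) + (k : Int)) = ((b0 * M + k : Nat) : Int) := by
    intro k; push_cast; ring
  simp only [hcast, PySem.List.pyGetD_natCast]
  rw [foldl_modify_range e0 ((List.range M).map (fun k => (xs.drop (b0 * k)).take b0))
    (fun k => xs.getD (b0 * M + k) 0) (by simp only [List.length_map, List.length_range]; omega)]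
  simp only [List.length_map, List.length_range]
  unfold tgtBuckets
  apply List.map_congr_left
  intro j hj
  have hjM : j < M := List.mem_range.mp hj
  rw [getD_map_range' M j _ hjM]
  have hdl : (xs.drop (b0 * M)).length = xs.length - b0 * M := by simp
  by_cases hje : j < e0
  · have hidx : b0 * M + j < xs.length := by omega
    rw [if_pos hje]
    have hsome : (xs.drop (b0 * M))[j]? = some (xs.getD (b0 * M + j) 0) := by
      rw [List.getElem?_drop]
      rw [List.getElem?_eq_getElem (by omega : b0 * M + j < xs.length)]
      rw [List.getD_eq_getElem?_getD, List.getElem?_eq_getElem (by omega : b0 * M + j < xs.length)]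
      rfl
    rw [hsome]
    rfl
  · rw [if_neg hje]
    have hnone : (xs.drop (b0 * M))[j]? = none := by
      rw [List.getElem?_eq_none_iff, hdl]
      omega
    rw [hnone]
    simp

theorem fst_mem_enumerate_bounds {α : Type} (xs : List α) (s : Int) (po : Int × α)
    (h : po ∈ PySem.List.enumerate xs s) : s ≤ po.1 ∧ po.1 < s + xs.length := by
  rw [PySem.List.mem_enumerate_iff] at h
  obtain ⟨k, hk, rfl⟩ := h
  constructor <;> simp <;> omega

theorem bucket_fold (ps : List (Int × Int)) (idx : Int → Nat) (b : List (List Int))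
    (h : ∀ po ∈ ps, idx po.1 < b.length) :
    ps.foldl (fun bks po => bks.modify (idx po.1) (fun l => l ++ [po.2])) b
    = (List.range b.length).map
        (fun j => (b[j]?.getD []) ++ (ps.filter (fun po => decide (idx po.1 = j))).map (·.2)) := by
  induction ps generalizing b with
  | nil =>
    apply List.ext_getElem (by simp)
    intro j h1 h2
    simp only [List.foldl_nil, List.getElem_map, List.getElem_range, List.filter_nil,
      List.map_nil, List.append_nil]
    rw [List.getElem?_eq_getElem (by simpa using h1)]
    rfl
  | cons p ps ih =>
    simp only [List.foldl_cons]
    rw [ih _ (fun po hpo => by rw [List.length_modify]; exact h po (List.mem_cons_of_mem _ hpo))]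
    apply List.ext_getElem (by simp)
    intro j h1 h2
    have hj : j < b.length := by simpa using h2
    have hj' : j < (b.modify (idx p.1) (fun l => l ++ [p.2])).length := by
      rw [List.length_modify]; exact hj
    simp only [List.getElem_map, List.getElem_range, List.length_modify]
    rw [List.getElem?_eq_getElem hj', List.getElem?_eq_getElem hj, List.getElem_modify,
      List.filter_cons]
    by_cases hpj : idx p.1 = j
    · simp [hpj]
    · simp [hpj]

theorem filt_single (ys : List Int) (c t : Int) (ht : 0 ≤ t)
    (pr : Int × Int → Bool) (hpr : ∀ po ∈ PySem.List.enumerate ys c, pr po = decide (po.1 - c = t)) :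
    ((PySem.List.enumerate ys c).filter pr).map (·.2) = (ys[t.toNat]?).toList := by
  induction ys generalizing c t with
  | nil => simp [PySem.List.enumerate]
  | cons y ys ih =>
    have hmem : ∀ po ∈ PySem.List.enumerate ys (c+1), po ∈ PySem.List.enumerate (y :: ys) c := by
      intro po hpo; rw [PySem.List.enumerate_cons]; exact List.mem_cons_of_mem _ hpo
    rw [PySem.List.enumerate_cons, List.filter_cons,
      hpr _ (by rw [PySem.List.enumerate_cons]; exact List.mem_cons_self)]
    by_cases ht0 : t = 0
    · subst ht0
      have hkeep : decide (c - c = (0:Int)) = true := by simp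
      rw [hkeep, if_pos rfl]
      have hempty : (PySem.List.enumerate ys (c+1)).filter pr = [] := by
        apply List.filter_eq_nil_iff.mpr
        intro po hpo
        have hb := fst_mem_enumerate_bounds ys (c+1) po hpo
        rw [hpr _ (hmem _ hpo)]
        simp; omega
      simp [hempty]
    · have hk : decide (c - c = t) = false := by simp; omega
      rw [hk, if_neg (by simp)]
      rw [ih (c+1) (t-1) (by omega)
        (fun po hpo => by
          rw [hpr _ (hmem _ hpo)]
          have hb := fst_mem_enumerate_bounds ys (c+1) po hpo
          simp only [decide_eq_decide]; omega)]
      have : t.toNat = (t-1).toNat + 1 := by omega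
      rw [this, List.getElem?_cons_succ]

theorem filt_range (ys : List Int) (c lo hi : Int) (hlo : 0 ≤ lo)
    (pr : Int × Int → Bool)
    (hpr : ∀ po ∈ PySem.List.enumerate ys c, pr po = decide (lo ≤ po.1 - c ∧ po.1 - c < hi)) :
    ((PySem.List.enumerate ys c).filter pr).map (·.2)
    = (ys.drop lo.toNat).take (hi - lo).toNat := by
  induction ys generalizing c lo hi with
  | nil => simp [PySem.List.enumerate]
  | cons y ys ih =>
    have hmem : ∀ po ∈ PySem.List.enumerate ys (c+1), po ∈ PySem.List.enumerate (y :: ys) c := by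
      intro po hpo; rw [PySem.List.enumerate_cons]; exact List.mem_cons_of_mem _ hpo
    rw [PySem.List.enumerate_cons, List.filter_cons,
      hpr _ (by rw [PySem.List.enumerate_cons]; exact List.mem_cons_self)]
    by_cases hlo0 : lo = 0
    · subst hlo0
      by_cases hhi : 0 < hi
      · have hkeep : decide ((0:Int) ≤ c - c ∧ c - c < hi) = true := by simp; omega
        rw [hkeep, if_pos rfl]
        rw [List.map_cons, ih (c+1) 0 (hi-1) le_rfl
          (fun po hpo => by
            rw [hpr _ (hmem _ hpo)]
            have hb := fst_mem_enumerate_bounds ys (c+1) po hpo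
            simp only [decide_eq_decide]; omega)]
        obtain ⟨k, hk⟩ : ∃ k, hi.toNat = k + 1 := ⟨hi.toNat - 1, by omega⟩
        simp [hk, List.take_succ_cons]
      · have hk : decide ((0:Int) ≤ c - c ∧ c - c < hi) = false := by simp; omega
        rw [hk, if_neg (by simp)]
        rw [ih (c+1) 0 (hi-1) le_rfl
          (fun po hpo => by
            rw [hpr _ (hmem _ hpo)]
            have hb := fst_mem_enumerate_bounds ys (c+1) po hpo
            simp only [decide_eq_decide]; omega)]
        have h0 : hi.toNat = 0 := by omega
        have h1 : (hi - 1).toNat = 0 := by omega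
        simp [h0, h1]
    · have hk : decide (lo ≤ c - c ∧ c - c < hi) = false := by simp; omega
      rw [hk, if_neg (by simp)]
      rw [ih (c+1) (lo-1) (hi-1) (by omega)
        (fun po hpo => by
          rw [hpr _ (hmem _ hpo)]
          simp only [decide_eq_decide]; omega)]
      have h1 : lo.toNat = (lo-1).toNat + 1 := by omega
      have h2 : (hi - 1 - (lo - 1)).toNat = (hi - lo).toNat := by omega
      rw [h2, h1, List.drop_succ_cons]

theorem B_eq_tgt (xs : List Int) (M : Nat) (hM : 1 ≤ M) :
    splitOrders_alt xs (M : Int) = tgtBuckets xs (xs.length / M) M := by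
  have hfd : PySem.Int.floordiv (xs.length : Int) (M : Int) = ((xs.length / M : Nat) : Int) :=
    PySem.Int.floordiv_natCast xs.length M
  show (PySem.List.enumerate xs 0).foldl
      (fun bks po =>
        bks.modify (if po.1 < PySem.Int.floordiv (xs.length : Int) (M : Int) * (M : Int)
            then PySem.Int.floordiv po.1 (PySem.Int.floordiv (xs.length : Int) (M : Int))
            else po.1 - PySem.Int.floordiv (xs.length : Int) (M : Int) * (M : Int)).toNat
          (fun l => l ++ [po.2]))
      (List.replicate ((M : Int)).toNat [])
      = tgtBuckets xs (xs.length / M) M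
  rw [hfd, Int.toNat_natCast]
  set b0 := xs.length / M with hb0
  clear_value b0
  have hdm : M * b0 + xs.length % M = xs.length := by rw [hb0]; exact Nat.div_add_mod xs.length M
  have heM : xs.length % M < M := Nat.mod_lt _ (by omega)
  have hmm : M * b0 = b0 * M := Nat.mul_comm M b0
  have hcut : ((b0 : Int) * (M : Int)) = ((b0 * M : Nat) : Int) := by push_cast; ring
  -- the owner index is always a valid bucket
  have hownerlt : ∀ po ∈ PySem.List.enumerate xs 0,
      (if po.1 < (b0 : Int) * (M : Int) then PySem.Int.floordiv po.1 (b0 : Int)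
       else po.1 - (b0 : Int) * (M : Int)).toNat < (List.replicate M ([] : List Int)).length := by
    intro po hpo
    rw [List.length_replicate]
    have hb := fst_mem_enumerate_bounds xs 0 po hpo
    by_cases hlt : po.1 < (b0 : Int) * (M : Int)
    · rw [if_pos hlt]
      have hb0pos : 0 < b0 := by
        by_contra h
        have : b0 = 0 := by omega
        rw [this] at hlt
        simp at hlt
        omega
      have : PySem.Int.floordiv po.1 (b0 : Int) < (M : Int) := by
        rw [PySem.Int.floordiv_lt_iff_lt_mul (by exact_mod_cast hb0pos)]
        calc po.1 < (b0 : Int) * (M : Int) := hlt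
          _ = (M : Int) * (b0 : Int) := by ring
      omega
    · rw [if_neg hlt]
      have h1 : po.1 < (xs.length : Int) := by omega
      have : (0:Int) ≤ po.1 - (b0 : Int) * (M : Int) := by omega
      have h2 : po.1 - (b0 : Int) * (M : Int) < (M : Int) := by
        have : ((M : Int)) * (b0 : Int) + ((xs.length % M : Nat) : Int) = (xs.length : Int) := by
          exact_mod_cast hdm
        have hc : ((xs.length % M : Nat) : Int) < (M : Int) := by exact_mod_cast heM
        omega
      omega
  rw [bucket_fold (PySem.List.enumerate xs 0)
      (fun p => (if p < (b0 : Int) * (M : Int) then PySem.Int.floordiv p (b0 : Int)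
        else p - (b0 : Int) * (M : Int)).toNat)
      (List.replicate M []) hownerlt]
  rw [List.length_replicate]
  unfold tgtBuckets
  apply List.map_congr_left
  intro j hj
  have hjM : j < M := List.mem_range.mp hj
  rw [List.getElem?_replicate, if_pos hjM]
  simp only [Option.getD_some, List.nil_append]
  -- split the list at the cut point
  have hsplit : xs = xs.take (b0 * M) ++ xs.drop (b0 * M) := (List.take_append_drop _ _).symm
  have hlenf : (xs.take (b0 * M)).length = b0 * M := by
    rw [List.length_take]
    omega
  conv_lhs => rw [hsplit]
  rw [PySem.List.enumerate_append, List.filter_append, List.map_append, hlenf]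
  congr 1
  · -- front: the j-th base block
    rw [filt_range (xs.take (b0 * M)) 0 ((b0 * j : Nat) : Int) ((b0 * (j+1) : Nat) : Int)
      (by positivity) _ ?_]
    · have hc1 : ((b0 * j : Nat) : Int).toNat = b0 * j := Int.toNat_natCast _
      have hc2 : (((b0 * (j+1) : Nat) : Int) - ((b0 * j : Nat) : Int)).toNat = b0 := by
        have : b0 * (j+1) = b0 * j + b0 := by rw [Nat.mul_succ]
        omega
      rw [hc1, hc2, List.drop_take]
      have h3 : b0 * M - b0 * j = b0 * (M - j) := by rw [Nat.mul_sub]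
      rw [List.take_take]
      congr 1
      have : b0 * j + b0 ≤ b0 * M := by
        calc b0 * j + b0 = b0 * (j+1) := by rw [Nat.mul_succ]
          _ ≤ b0 * M := Nat.mul_le_mul_left _ (by omega)
      omega
    · intro po hpo
      have hb := fst_mem_enumerate_bounds _ 0 po hpo
      rw [List.length_take] at hb
      have hfl : min (b0 * M) xs.length = b0 * M := by omega
      rw [hfl] at hb
      have hlt : po.1 < (b0 : Int) * (M : Int) := by rw [hcut]; omega
      rw [if_pos hlt]
      rcases Nat.eq_zero_or_pos b0 with h0 | hb0pos
      · exfalso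
        rw [h0] at hb
        simp at hb
        omega
      · have hq0 : 0 ≤ PySem.Int.floordiv po.1 (b0 : Int) := by
          rw [PySem.Int.floordiv_eq_ediv_of_pos (by exact_mod_cast hb0pos)]
          exact Int.ediv_nonneg (by omega) (by positivity)
        have hfe : PySem.Int.floordiv po.1 (b0 : Int) = (j : Int) ↔
            ((b0 * j : Nat) : Int) ≤ po.1 ∧ po.1 < ((b0 * (j+1) : Nat) : Int) := by
          rw [PySem.Int.floordiv_eq_iff_of_pos (by exact_mod_cast hb0pos)]
          have e1 : ((j : Int)) * (b0 : Int) = ((b0 * j : Nat) : Int) := by push_cast; ring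
          have e2 : ((j : Int) + 1) * (b0 : Int) = ((b0 * (j+1) : Nat) : Int) := by push_cast; ring
          rw [e1, e2]
        simp only [decide_eq_decide, sub_zero]
        omega
  · -- back: the j-th leftover element
    rw [filt_single (xs.drop (b0 * M)) ((0 : Int) + ((b0 * M : Nat) : Int)) ((j : Nat) : Int)
      (by positivity) _ ?_]
    · rw [Int.toNat_natCast]
    · intro po hpo
      have hb := fst_mem_enumerate_bounds _ _ po hpo
      have hge : ((b0 * M : Nat) : Int) ≤ po.1 := by omega
      have hnlt : ¬ po.1 < (b0 : Int) * (M : Int) := by rw [hcut]; omega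
      rw [if_neg hnlt]
      simp only [decide_eq_decide]
      rw [hcut]
      omega

-- ===== VERDICT (by name: the statement is the Claim_ definition above) =====
theorem splitOrders_spec : Claim_equal_splitOrders := by
  intro orderList numOfEmp _ hpre
  have hp : (1 : Int) ≤ numOfEmp := hpre
  have hM : numOfEmp = (numOfEmp.toNat : Int) := (Int.toNat_of_nonneg (by omega)).symm
  have h1 : 1 ≤ numOfEmp.toNat := by omega
  unfold Spec_splitOrders
  rw [hM, A_eq_tgt _ _ h1, B_eq_tgt _ _ h1]
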